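-- pv_equiv track=rewrite | github.com/HELIOS516/trauma-evidence-forge-v3 | scripts/convert_inline_citations.py | assign_numbers
-- ===== SOURCE A (Python) =====
-- def dedup_key(cite: dict) -> str:
--     """Generate deduplication key for a citation.
--
--     Two citations are the same if they have identical PMID or identical (author, year).
--     """
--     if cite['pmid']:
--         return f"pmid:{cite['pmid']}"
--     return f"{cite['author'].lower()}:{cite['year']}"
--
-- def assign_numbers(citations: list[dict]) -> dict[str, int]:
--     """Assign sequential [N] numbers to unique citations. Returns key -> number mapping."""
--     mapping = {}
--     counter = 1
--     for cite in citations: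
--         key = dedup_key(cite)
--         if key not in mapping:
--             mapping[key] = counter
--             counter += 1
--     return mapping
-- ===== SOURCE B (Python) =====
-- def dedup_key(cite: dict) -> str:
--     """Generate deduplication key for a citation (same rule as A)."""
--     if cite['pmid']:
--         return f"pmid:{cite['pmid']}"
--     return f"{cite['author'].lower()}:{cite['year']}"
--
--
-- def assign_numbers(citations: list[dict]) -> dict[str, int]:
--     """No running counter or accumulated mapping: a key's number is computed
--     independently as the count of distinct keys in the prefix of the key list
--     up to and including its first occurrence; a prefix membership test selects
--     the first occurrences."""
--     keys = [dedup_key(c) for c in citations]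
--     return {k: len(set(keys[:i + 1]))
--             for i, k in enumerate(keys)
--             if k not in keys[:i]}
-- ===== Notes on version B (the rewrite author's own statement) =====
-- stated objective: alternative
-- what changed: B drops A's running counter and accumulated mapping entirely: it computes each key's number independently as the count of distinct keys in the prefix of the key list up to and including its first occurrence (len(set(keys[:i+1]))), selecting first occurrences by a prefix membership test; this trades A's O(n) incremental state for an O(n^2) stateless counting formula.
import Mathlib
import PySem

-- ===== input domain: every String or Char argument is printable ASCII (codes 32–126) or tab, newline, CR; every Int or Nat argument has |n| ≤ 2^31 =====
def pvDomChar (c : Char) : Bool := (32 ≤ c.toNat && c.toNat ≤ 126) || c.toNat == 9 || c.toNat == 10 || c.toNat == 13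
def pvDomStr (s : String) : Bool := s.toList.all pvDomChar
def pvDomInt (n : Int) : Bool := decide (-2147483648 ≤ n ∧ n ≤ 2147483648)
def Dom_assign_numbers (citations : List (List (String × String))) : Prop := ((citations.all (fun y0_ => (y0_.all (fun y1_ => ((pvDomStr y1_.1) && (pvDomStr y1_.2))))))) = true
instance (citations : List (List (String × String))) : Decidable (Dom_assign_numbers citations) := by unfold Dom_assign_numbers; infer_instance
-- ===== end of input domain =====

-- B replaces A's running counter and accumulated mapping by a stateless counting formula:
-- each key's number is the count of distinct keys in the prefix up to its first occurrence.

-- ===== PORT A =====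
-- shared helper: Python dedup_key (identical in Source A and Source B); none = KeyError (missing dict key)
def pyDedupKey (cite : List (String × String)) : Option String :=
  match (PySem.Dict.mk cite).get? "pmid" with
  | none => none
  | some p =>
    if p ≠ "" then some ("pmid:" ++ p)
    else
      match (PySem.Dict.mk cite).get? "author", (PySem.Dict.mk cite).get? "year" with
      | some a, some y => some (PySem.Str.lower a ++ ":" ++ y)
      | _, _ => none

def assign_numbers (citations : List (List (String × String))) : List (String × Int) :=
  (citations.foldl
    (fun (st : PySem.Dict String Int × Int) cite =>
      match pyDedupKey cite with
      | none => st  -- Python raises KeyError here; excluded by Pre_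
      | some key =>
        if st.1.contains key = false then (st.1.insert key st.2, st.2 + 1) else st)
    (PySem.Dict.empty, 1)).1.items

-- ===== PORT B =====
def assign_numbers_alt (citations : List (List (String × String))) : List (String × Int) :=
  -- keys = [dedup_key(c) for c in citations]   (KeyError excluded by Pre_)
  let keys := citations.filterMap pyDedupKey
  -- {k: len(set(keys[:i+1])) for i, k in enumerate(keys) if k not in keys[:i]}
  ((PySem.List.enumerate keys 0).foldl
    (fun (d : PySem.Dict String Int) p =>
      if (PySem.List.slice keys none (some p.1)).contains p.2 then d
      else d.insert p.2 (PySem.Set.len (PySem.Set.ofList (PySem.List.slice keys none (some (p.1 + 1))))))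
    PySem.Dict.empty).items

-- ===== PRECONDITION & SPEC =====
-- Pre_ excludes exactly the inputs where dedup_key raises KeyError: a citation without a
-- 'pmid' key, or with an empty 'pmid' and no 'author' or no 'year' key.
def Pre_assign_numbers (citations : List (List (String × String))) : Prop :=
  ∀ cite ∈ citations,
    ((PySem.Dict.mk cite).get? "pmid").isSome = true ∧
    ((PySem.Dict.mk cite).get? "pmid" = some "" →
      ((PySem.Dict.mk cite).get? "author").isSome = true ∧
      ((PySem.Dict.mk cite).get? "year").isSome = true)
instance (citations : List (List (String × String))) : Decidable (Pre_assign_numbers citations) := by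
  unfold Pre_assign_numbers; infer_instance

def pvWitness_assign_numbers : (List (List (String × String))) :=
  [[("pmid", "123"), ("author", "Smith"), ("year", "2020")],
   [("pmid", ""), ("author", "Jones"), ("year", "1999")]]

def Spec_assign_numbers (citations : List (List (String × String))) (out : List (String × Int)) : Prop := out = assign_numbers_alt citations
instance (citations : List (List (String × String))) (out : List (String × Int)) : Decidable (Spec_assign_numbers citations out) := by unfold Spec_assign_numbers; infer_instance

-- ===== CLAIM (what is proved, stated in full; the proofs are below) =====
def Claim_equal_assign_numbers : Prop := ∀ (citations : List (List (String × String))), Dom_assign_numbers citations → Pre_assign_numbers citations → Spec_assign_numbers citations (assign_numbers citations)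

-- ===== LEMMAS AND PROOFS =====

-- the elements of xs not yet in `seen`, deduplicated, in first-occurrence order
def pvFresh (seen : List String) : List String → List String
  | [] => []
  | x :: t => if x ∈ seen then pvFresh seen t else x :: pvFresh (seen ++ [x]) t

theorem pvFresh_spec (xs : List String) : ∀ seen : List String,
    pvFresh seen xs = (PySem.Set.ofList xs).filter (fun y => !(seen.contains y)) := by
  induction xs with
  | nil => intro seen; simp [pvFresh, PySem.Set.ofList_nil]
  | cons x t ih =>
    intro seen
    rw [PySem.Set.ofList_cons]
    unfold PySem.Set.discard
    rw [List.filter_cons, List.filter_filter]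
    by_cases hx : x ∈ seen
    · have hcx : seen.contains x = true := List.contains_iff_mem.2 hx
      rw [pvFresh, if_pos hx, ih seen]
      simp only [hcx, Bool.not_true, Bool.false_eq_true, if_false]
      apply List.filter_congr
      intro y _
      by_cases hyx : y = x
      · subst hyx; simp [hx]
      · simp [hyx]
    · have hcx : seen.contains x = false := by
        cases h : seen.contains x with
        | false => rfl
        | true => exact absurd (List.contains_iff_mem.1 h) hx
      rw [pvFresh, if_neg hx]
      simp only [hcx, Bool.not_false, if_true]
      congr 1
      rw [ih (seen ++ [x])]
      apply List.filter_congr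
      intro y _
      by_cases hyx : y = x
      · subst hyx; simp
      · simp [hyx]

theorem pvFresh_nil (xs : List String) : pvFresh [] xs = PySem.List.dedup xs := by
  rw [pvFresh_spec, PySem.List.dedup_eq_ofList]
  simp

-- the seen list only matters up to membership
theorem pvFresh_congr (xs : List String) (s t : List String)
    (h : ∀ y, y ∈ s ↔ y ∈ t) : pvFresh s xs = pvFresh t xs := by
  rw [pvFresh_spec, pvFresh_spec]
  apply List.filter_congr
  intro y _
  by_cases hy : y ∈ s
  · simp [hy, (h y).1 hy]
  · have : y ∉ t := fun hyt => hy ((h y).2 hyt)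
    simp [hy, this]

-- set(pre ++ [x]) grows by exactly the fresh element
theorem pvOfListSnoc (pre : List String) (x : String) :
    PySem.Set.ofList (pre ++ [x]) = PySem.Set.add (PySem.Set.ofList pre) x := by
  rw [PySem.Set.ofList_eq_foldl, PySem.Set.ofList_eq_foldl, List.foldl_append]
  rfl

-- characterisation of A's loop: starting from any dict d with distinct keys and counter
-- d.size + 1, the loop appends the fresh keys numbered consecutively from d.size + 1.
theorem pvLoopA (cs : List (List (String × String))) :
    ∀ (d : PySem.Dict String Int), d.keys.Nodup →
    (cs.foldl
      (fun (st : PySem.Dict String Int × Int) cite =>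
        match pyDedupKey cite with
        | none => st
        | some key =>
          if st.1.contains key = false then (st.1.insert key st.2, st.2 + 1) else st)
      (d, (d.size : Int) + 1)).1.items
    = d.items ++ (PySem.List.enumerate (pvFresh d.keys (cs.filterMap pyDedupKey))
        ((d.size : Int) + 1)).map (fun p => (p.2, p.1)) := by
  induction cs with
  | nil => intro d _; simp [pvFresh, PySem.List.enumerate_nil]
  | cons c t ih =>
    intro d hnd
    simp only [List.foldl_cons, List.filterMap_cons]
    cases hk : pyDedupKey c with
    | none => simpa using ih d hnd
    | some k =>
      simp only []
      by_cases hc : d.contains k = true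
      · -- key already present: both sides skip
        rw [if_neg (by simp [hc])]
        have hmem : k ∈ d.keys := (PySem.Dict.contains_iff_mem_keys d k).1 hc
        simp only [pvFresh, if_pos hmem]
        exact ih d hnd
      · -- fresh key: insert, counter advances
        have hc' : d.contains k = false := by
          cases h : d.contains k with
          | false => rfl
          | true => exact absurd h hc
        rw [if_pos hc']
        have hmem : k ∉ d.keys := fun h => hc ((PySem.Dict.contains_iff_mem_keys d k).2 h)
        have hsz : ((d.insert k ((d.size : Int) + 1)).size : Int) = (d.size : Int) + 1 := by
          rw [PySem.Dict.size_insert]; simp [hc']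
        have hkeys : (d.insert k ((d.size : Int) + 1)).keys = d.keys ++ [k] :=
          PySem.Dict.keys_insert_of_not_contains d _ hc'
        have hnd' : (d.insert k ((d.size : Int) + 1)).keys.Nodup := by
          rw [hkeys, List.nodup_append]
          refine ⟨hnd, List.nodup_singleton k, ?_⟩
          intro a ha b hb
          rw [List.mem_singleton] at hb
          subst hb
          intro h
          exact hmem (h ▸ ha)
        have := ih (d.insert k ((d.size : Int) + 1)) hnd'
        rw [hsz, hkeys] at this
        rw [this, PySem.Dict.items_insert_of_not_contains d _ hc']
        simp only [pvFresh, if_neg hmem, PySem.List.enumerate_cons, List.map_cons,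
          List.append_assoc, List.cons_append, List.nil_append]

-- characterisation of B's loop over the enumerated key list: with the processed prefix
-- `pre` behind it, it performs exactly the inserts of the fresh keys, numbered from
-- |set(pre)| + 1 (a fresh key at absolute position i gets value |set(keys[:i+1])|).
theorem pvLoopB (g : List String) : ∀ (rest pre : List String) (d : PySem.Dict String Int),
    g = pre ++ rest →
    (PySem.List.enumerate rest (pre.length : Int)).foldl
      (fun (d : PySem.Dict String Int) p =>
        if (PySem.List.slice g none (some p.1)).contains p.2 then d
        else d.insert p.2 (PySem.Set.len (PySem.Set.ofList (PySem.List.slice g none (some (p.1 + 1)))))) d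
    = (PySem.List.enumerate (pvFresh pre rest) (((PySem.Set.ofList pre).length : Int) + 1)).foldl
        (fun (d : PySem.Dict String Int) p => d.insert p.2 p.1) d := by
  intro rest
  induction rest with
  | nil => intro pre d _; simp [pvFresh, PySem.List.enumerate_nil]
  | cons x t ih =>
    intro pre d hg
    rw [PySem.List.enumerate_cons, List.foldl_cons]
    have hslice : PySem.List.slice g none (some (pre.length : Int)) = pre := by
      rw [PySem.List.slice_to_natCast, hg]
      simp
    have hslice1 : PySem.List.slice g none (some ((pre.length : Int) + 1)) = pre ++ [x] := by
      have : ((pre.length : Int) + 1) = ((pre.length + 1 : Nat) : Int) := by push_cast; ring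
      rw [this, PySem.List.slice_to_natCast, hg]
      simp [List.take_append]
    have hg' : g = (pre ++ [x]) ++ t := by rw [hg]; simp
    have hlen : ((pre.length : Int) + 1) = (((pre ++ [x]).length : Nat) : Int) := by
      simp
    by_cases hx : x ∈ pre
    · -- duplicate: skipped on both sides
      rw [hslice, if_pos (List.contains_iff_mem.2 hx)]
      rw [hlen, ih (pre ++ [x]) d hg']
      have h1 : pvFresh (pre ++ [x]) t = pvFresh pre t := by
        apply pvFresh_congr
        intro y
        constructor
        · intro h
          rcases List.mem_append.1 h with h | h
          · exact h
          · rw [List.mem_singleton] at h; exact h ▸ hx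
        · intro h; exact List.mem_append.2 (Or.inl h)
      have h2 : PySem.Set.ofList (pre ++ [x]) = PySem.Set.ofList pre := by
        rw [pvOfListSnoc]
        unfold PySem.Set.add
        rw [if_pos]
        rw [PySem.Set.contains_iff, PySem.Set.mem_ofList]
        exact hx
      rw [h1, h2]
      simp only [pvFresh, if_pos hx]
    · -- fresh key: inserted with value |set(pre ++ [x])| = |set(pre)| + 1
      have hcx : pre.contains x = false := by
        cases h : pre.contains x with
        | false => rfl
        | true => exact absurd (List.contains_iff_mem.1 h) hx
      rw [hslice, hcx, if_neg (by simp)]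
      have hofl : PySem.Set.ofList (pre ++ [x]) = PySem.Set.ofList pre ++ [x] := by
        rw [pvOfListSnoc]
        unfold PySem.Set.add
        rw [if_neg]
        intro h
        exact hx ((PySem.Set.mem_ofList pre x).1 (PySem.Set.contains_iff _ _ |>.1 h))
      have hval : PySem.Set.len (PySem.Set.ofList (PySem.List.slice g none (some ((pre.length : Int) + 1))))
          = ((PySem.Set.ofList pre).length : Int) + 1 := by
        rw [hslice1, hofl]
        simp [PySem.Set.len]
      rw [hval, hlen, ih (pre ++ [x]) _ hg']
      simp only [pvFresh, if_neg hx, PySem.List.enumerate_cons, List.foldl_cons, hofl]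
      have : (((PySem.Set.ofList pre ++ [x]).length : Nat) : Int) + 1
          = (((PySem.Set.ofList pre).length : Int) + 1) + 1 := by simp
      rw [this]

-- B's inserts run over distinct fresh keys, so the items are exactly the numbered pairs
theorem pvAltItems (cs : List (List (String × String))) :
    assign_numbers_alt cs
    = (PySem.List.enumerate (PySem.List.dedup (cs.filterMap pyDedupKey)) 1).map
        (fun p => (p.2, p.1)) := by
  unfold assign_numbers_alt
  have h0 : ((List.nil : List String).length : Int) = 0 := by simp
  have := pvLoopB (cs.filterMap pyDedupKey) (cs.filterMap pyDedupKey) [] PySem.Dict.empty (by simp)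
  rw [h0] at this
  simp only [this, pvFresh_nil]
  have hfresh : (((PySem.Set.ofList ([] : List String)).length : Nat) : Int) + 1 = 1 := by
    simp [PySem.Set.ofList_nil]
  rw [hfresh]
  rw [PySem.Dict.items_foldl_insert_fresh (PySem.List.enumerate (PySem.List.dedup (cs.filterMap pyDedupKey)) 1) (fun p => p.2) (fun p => p.1)]
  · rw [show (PySem.Dict.empty : PySem.Dict String Int).items = [] from rfl]; simp
  · intro a _; exact PySem.Dict.contains_empty _
  · rw [PySem.List.map_snd_enumerate, PySem.List.dedup_eq_ofList]
    exact PySem.Set.nodup_ofList _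

-- ===== VERDICT (by name: the statement is the Claim_ definition above) =====
theorem assign_numbers_spec : Claim_equal_assign_numbers := by
  intro citations _ _
  unfold Spec_assign_numbers
  unfold assign_numbers
  have h := pvLoopA citations PySem.Dict.empty (by simp)
  simp only [PySem.Dict.size_empty, Nat.cast_zero, zero_add] at h
  rw [h, pvAltItems]
  rw [show (PySem.Dict.empty : PySem.Dict String Int).items = [] from rfl,
      show (PySem.Dict.empty : PySem.Dict String Int).keys = [] from rfl,
      pvFresh_nil]
  simp
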